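-- pv_equiv track=rewrite | github.com/dylangf16/CE-1102-Proyecto01 | tkinter-base-main/Tarea 1 Taller CE/interfaz_Roger_V.py | compare_aux
-- ===== SOURCE A (Python) =====
-- def compare_aux(num1, num2):
--     if num1 == 0:
--         return "True"
--     elif num1 > num2:
--         return "False"
--     elif num1%10 > num2%10:
--         return "False"
--     else:
--         return compare_aux(num1 // 10, num2 // 10)
-- ===== SOURCE B (Python) =====
-- def compare_aux(num1, num2):
--     # Digit-wise check: for num1 >= 0, A's answer is "True" iff num2 is not
--     # negative (when num1 != 0) and every decimal digit of num1 is <= the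
--     # corresponding digit of num2; the per-step magnitude test is redundant.
--     if num1 != 0 and num2 < 0:
--         return "False"
--     ok = True
--     a, b = num1, num2
--     while a > 0:
--         ok = ok and a % 10 <= b % 10
--         a //= 10
--         b //= 10
--     return "True" if ok else "False"
-- ===== Notes on version B (the rewrite author's own statement) =====
-- stated objective: simpler
-- what changed: Replaces the three-guard tail recursion by a single boolean-accumulator loop over the digits that drops the per-step magnitude test num1 > num2, which is redundant for nonnegative num1 (one up-front sign check on num2 replaces it).
-- outside the precondition, e.g. on compare_aux(-5, 3): A returns 'False', B returns 'True'; on compare_aux(-5, -3): A raises RecursionError, B returns 'False'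
import Mathlib
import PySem

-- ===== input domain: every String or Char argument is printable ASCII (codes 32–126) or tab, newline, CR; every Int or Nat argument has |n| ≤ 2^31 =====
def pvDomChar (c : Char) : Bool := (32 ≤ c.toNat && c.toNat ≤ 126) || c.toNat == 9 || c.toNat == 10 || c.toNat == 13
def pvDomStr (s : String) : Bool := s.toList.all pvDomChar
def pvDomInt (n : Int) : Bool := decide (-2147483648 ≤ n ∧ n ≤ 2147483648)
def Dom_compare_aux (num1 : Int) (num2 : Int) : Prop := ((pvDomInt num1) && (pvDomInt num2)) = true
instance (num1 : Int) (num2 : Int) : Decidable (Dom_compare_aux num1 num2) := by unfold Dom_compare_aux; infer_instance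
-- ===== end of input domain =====

-- B replaces A's three-guard tail recursion by a boolean-accumulator digit loop
-- without the redundant per-step magnitude test (objective: simpler).

-- ===== PORT A =====
-- Literal transliteration of A's tail recursion; the fuel argument only makes the
-- recursion total in Lean (num1.natAbs + 1 steps always suffice when 0 ≤ num1,
-- which Pre_ guarantees; the fuel-0 value is never reached there).
def compare_auxGo : Nat → Int → Int → String
  | 0, _, _ => "False"
  | f + 1, num1, num2 =>
    if num1 = 0 then "True"
    else if num1 > num2 then "False"
    else if PySem.Int.mod num1 10 > PySem.Int.mod num2 10 then "False"
    else compare_auxGo f (PySem.Int.floordiv num1 10) (PySem.Int.floordiv num2 10)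

def compare_aux (num1 : Int) (num2 : Int) : String :=
  compare_auxGo (num1.natAbs + 1) num1 num2

-- ===== PORT B =====
-- the while-loop of Source B, with its boolean accumulator `ok` (fuel for totality only)
def compare_auxAltLoop : Nat → Int → Int → Bool → Bool
  | 0, _, _, ok => ok
  | f + 1, a, b, ok =>
    if a > 0 then
      compare_auxAltLoop f (PySem.Int.floordiv a 10) (PySem.Int.floordiv b 10)
        (ok && decide (PySem.Int.mod a 10 ≤ PySem.Int.mod b 10))
    else ok

def compare_aux_alt (num1 : Int) (num2 : Int) : String :=
  if num1 ≠ 0 ∧ num2 < 0 then "False"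
  else if compare_auxAltLoop (num1.natAbs + 1) num1 num2 true then "True" else "False"

-- ===== PRECONDITION & SPEC =====
-- Pre_ restricts to the natural domain of digit comparison, nonnegative num1:
-- for negative num1 A's recursion either never terminates (RecursionError, e.g.
-- (-5,-3)) or returns values shaped by Python's negative floor-division residues.
def Pre_compare_aux (num1 : Int) (num2 : Int) : Prop := 0 ≤ num1
instance (num1 : Int) (num2 : Int) : Decidable (Pre_compare_aux num1 num2) := by
  unfold Pre_compare_aux; infer_instance

def pvWitness_compare_aux : Int × Int := (12, 34)

def Spec_compare_aux (num1 : Int) (num2 : Int) (out : String) : Prop := out = compare_aux_alt num1 num2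
instance (num1 : Int) (num2 : Int) (out : String) : Decidable (Spec_compare_aux num1 num2 out) := by
  unfold Spec_compare_aux; infer_instance

-- ===== CLAIM (what is proved, stated in full; the proofs are below) =====
def Claim_equal_compare_aux : Prop := ∀ (num1 : Int) (num2 : Int), Dom_compare_aux num1 num2 → Pre_compare_aux num1 num2 → Spec_compare_aux num1 num2 (compare_aux num1 num2)

-- ===== LEMMAS AND PROOFS =====

theorem fd10_nonneg {a : Int} (h : 0 ≤ a) : 0 ≤ PySem.Int.floordiv a 10 := by
  rw [PySem.Int.floordiv_eq_ediv_of_pos (by norm_num)]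
  exact Int.ediv_nonneg h (by norm_num)

theorem mod10_bounds (a : Int) : 0 ≤ PySem.Int.mod a 10 ∧ PySem.Int.mod a 10 < 10 := by
  rw [PySem.Int.mod_eq_emod_of_pos (by norm_num)]
  exact ⟨Int.emod_nonneg a (by norm_num), Int.emod_lt_of_pos a (by norm_num)⟩

theorem fd10_decomp (a : Int) :
    PySem.Int.floordiv a 10 * 10 + PySem.Int.mod a 10 = a :=
  PySem.Int.floordiv_mul_add_mod a 10

theorem fd10_natAbs_lt {a : Int} (h : 0 < a) :
    (PySem.Int.floordiv a 10).natAbs < a.natAbs := by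
  have h1 := fd10_nonneg (le_of_lt h)
  have h2 := mod10_bounds a
  have h3 := fd10_decomp a
  omega

theorem altLoop_acc (f : Nat) :
    ∀ (a b : Int) (ok : Bool),
      compare_auxAltLoop f a b ok = (ok && compare_auxAltLoop f a b true) := by
  induction f with
  | zero => intro a b ok; simp [compare_auxAltLoop]
  | succ f ih =>
    intro a b ok
    by_cases h : a > 0
    · simp only [compare_auxAltLoop, if_pos h]
      rw [ih, ih _ _ (true && _)]
      simp [Bool.and_assoc]
    · simp [compare_auxAltLoop, if_neg h]

theorem altLoop_fuel (f : Nat) :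
    ∀ (g : Nat) (a b : Int), 0 ≤ a → a.natAbs < f → a.natAbs < g →
      compare_auxAltLoop f a b true = compare_auxAltLoop g a b true := by
  induction f with
  | zero => intro g a b _ hf _; omega
  | succ f ih =>
    intro g a b ha hf hg
    cases g with
    | zero => omega
    | succ g =>
      by_cases h : a > 0
      · simp only [compare_auxAltLoop, if_pos h]
        rw [altLoop_acc f, altLoop_acc g]
        have hlt := fd10_natAbs_lt h
        rw [ih g (PySem.Int.floordiv a 10) (PySem.Int.floordiv b 10)
              (fd10_nonneg ha) (by omega) (by omega)]
      · simp [compare_auxAltLoop, if_neg h]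

theorem altLoop_le (f : Nat) :
    ∀ (a b : Int), 0 ≤ a → 0 ≤ b → a.natAbs < f →
      compare_auxAltLoop f a b true = true → a ≤ b := by
  induction f with
  | zero => intro a b _ _ hf _; omega
  | succ f ih =>
    intro a b ha hb hf hT
    by_cases h : a > 0
    · simp only [compare_auxAltLoop, if_pos h] at hT
      rw [altLoop_acc] at hT
      simp only [Bool.true_and, Bool.and_eq_true, decide_eq_true_eq] at hT
      obtain ⟨hc, hrest⟩ := hT
      have hlt := fd10_natAbs_lt h
      have hle := ih (PySem.Int.floordiv a 10) (PySem.Int.floordiv b 10)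
        (fd10_nonneg (le_of_lt h)) (fd10_nonneg hb) (by omega) hrest
      have d1 := fd10_decomp a
      have d2 := fd10_decomp b
      omega
    · omega

theorem main_eq (f : Nat) :
    ∀ (n1 n2 : Int), 0 ≤ n1 → n1.natAbs < f →
      compare_auxGo f n1 n2 = compare_aux_alt n1 n2 := by
  induction f with
  | zero => intro n1 n2 _ hf; omega
  | succ f ih =>
    intro n1 n2 h1 hf
    by_cases h0 : n1 = 0
    · subst h0
      simp [compare_auxGo, compare_aux_alt, compare_auxAltLoop]
    · have hpos : 0 < n1 := by omega
      by_cases h2 : n2 < 0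
      · have : n1 > n2 := by omega
        simp [compare_auxGo, compare_aux_alt, h0, this, h2]
      · -- n2 ≥ 0
        rw [Int.not_lt] at h2
        have hb' : 0 ≤ PySem.Int.floordiv n2 10 := fd10_nonneg h2
        have ha' : 0 ≤ PySem.Int.floordiv n1 10 := fd10_nonneg h1
        have hlt := fd10_natAbs_lt hpos
        -- unfold one step of the alt loop
        have hstep : compare_auxAltLoop (n1.natAbs + 1) n1 n2 true =
            (decide (PySem.Int.mod n1 10 ≤ PySem.Int.mod n2 10) &&
             compare_auxAltLoop n1.natAbs (PySem.Int.floordiv n1 10) (PySem.Int.floordiv n2 10) true) := by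
          simp only [compare_auxAltLoop, if_pos hpos]
          rw [altLoop_acc]
          simp
        have hcond : ¬ (n1 ≠ 0 ∧ n2 < 0) := by intro hx; exact absurd hx.2 (by omega)
        by_cases h3 : n1 > n2
        · have hfalse : compare_auxAltLoop (n1.natAbs + 1) n1 n2 true = false := by
            cases hv : compare_auxAltLoop (n1.natAbs + 1) n1 n2 true with
            | false => rfl
            | true =>
              exact absurd (altLoop_le (n1.natAbs + 1) n1 n2 h1 h2 (by omega) hv) (by omega)
          simp only [compare_auxGo, if_neg h0, if_pos h3]
          unfold compare_aux_alt
          rw [if_neg hcond, hfalse]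
          simp
        · by_cases h4 : PySem.Int.mod n1 10 > PySem.Int.mod n2 10
          · have hc : (decide (PySem.Int.mod n1 10 ≤ PySem.Int.mod n2 10)) = false := by
              simp only [decide_eq_false_iff_not]; omega
            simp only [compare_auxGo, if_neg h0, if_neg h3, if_pos h4]
            unfold compare_aux_alt
            rw [if_neg hcond, hstep, hc, Bool.false_and]
            simp
          · have hc : (decide (PySem.Int.mod n1 10 ≤ PySem.Int.mod n2 10)) = true := by
              simp only [decide_eq_true_eq]; omega
            have hrec := ih (PySem.Int.floordiv n1 10) (PySem.Int.floordiv n2 10) ha' (by omega)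
            have hfuel : compare_auxAltLoop n1.natAbs (PySem.Int.floordiv n1 10) (PySem.Int.floordiv n2 10) true =
                compare_auxAltLoop ((PySem.Int.floordiv n1 10).natAbs + 1) (PySem.Int.floordiv n1 10) (PySem.Int.floordiv n2 10) true :=
              altLoop_fuel n1.natAbs _ _ _ ha' (by omega) (by omega)
            have hcond' : ¬ (PySem.Int.floordiv n1 10 ≠ 0 ∧ PySem.Int.floordiv n2 10 < 0) := by
              intro hx; exact absurd hx.2 (by omega)
            have halt : compare_aux_alt (PySem.Int.floordiv n1 10) (PySem.Int.floordiv n2 10) =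
                if compare_auxAltLoop ((PySem.Int.floordiv n1 10).natAbs + 1) (PySem.Int.floordiv n1 10) (PySem.Int.floordiv n2 10) true then "True" else "False" := by
              unfold compare_aux_alt
              rw [if_neg hcond']
            simp only [compare_auxGo, if_neg h0, if_neg h3, if_neg h4]
            rw [hrec, halt]
            unfold compare_aux_alt
            rw [if_neg hcond, hstep, hc, Bool.true_and, hfuel]

-- ===== VERDICT (by name: the statement is the Claim_ definition above) =====
theorem compare_aux_spec : Claim_equal_compare_aux := by
  intro n1 n2 _ hpre
  unfold Spec_compare_aux compare_aux
  exact main_eq (n1.natAbs + 1) n1 n2 hpre (by omega)
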